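-- pv_equiv track=rewrite | github.com/MSKazemi/kubeintellect | app/agents/tools/tools_lib/patch_tools.py | _build_kv_diff
-- ===== SOURCE A (Python) =====
-- def _build_kv_diff(label_or_annotation: str, current: dict, proposed: dict) -> str:
--     """Diff for labels or annotations."""
--     added = {k: v for k, v in proposed.items() if k not in current}
--     removed = {k: v for k, v in current.items() if k not in proposed}
--     changed = {
--         k: (current[k], proposed[k])
--         for k in proposed
--         if k in current and current[k] != proposed[k]
--     }
--     unchanged_count = len(proposed) - len(added) - len(changed)
--
--     if not added and not removed and not changed:
--         return f"No changes — proposed {label_or_annotation} are identical to current state."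
--
--     lines = []
--     for k, v in sorted(added.items()):
--         lines.append(f"  + {k}={v!r}  ← ADDED")
--     for k, (old, new) in sorted(changed.items()):
--         lines.append(f"  ~ {k}: {old!r} → {new!r}  ← CHANGED")
--     for k, v in sorted(removed.items()):
--         lines.append(f"  - {k}={v!r}  ← REMOVED")
--     lines.append(f"  (unchanged: {unchanged_count})")
--     return "\n".join(lines)
-- ===== SOURCE B (Python) =====
-- def _build_kv_diff(label_or_annotation: str, current: dict, proposed: dict) -> str:
--     """Diff for labels or annotations: one classifying pass over the sorted key union."""
--     keys = sorted(set(list(current) + list(proposed)))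
--     added_lines, changed_lines, removed_lines = [], [], []
--     unchanged = 0
--     for k in keys:
--         if k in current and k in proposed:
--             old, new = current[k], proposed[k]
--             if old != new:
--                 changed_lines.append(f"  ~ {k}: {old!r} → {new!r}  ← CHANGED")
--             else:
--                 unchanged += 1
--         elif k in proposed:
--             added_lines.append(f"  + {k}={proposed[k]!r}  ← ADDED")
--         else:
--             removed_lines.append(f"  - {k}={current[k]!r}  ← REMOVED")
--     if not added_lines and not changed_lines and not removed_lines:
--         return f"No changes — proposed {label_or_annotation} are identical to current state."
--     lines = added_lines + changed_lines + removed_lines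
--     lines.append(f"  (unchanged: {unchanged})")
--     return "\n".join(lines)
-- ===== Notes on version B (the rewrite author's own statement) =====
-- stated objective: alternative
-- what changed: Instead of three separate dict comprehensions followed by three independent sorts, B sorts the union of the two key sets once and classifies each key into added/changed/removed lines (and an unchanged counter) in a single pass over that sorted union.
import Mathlib
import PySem

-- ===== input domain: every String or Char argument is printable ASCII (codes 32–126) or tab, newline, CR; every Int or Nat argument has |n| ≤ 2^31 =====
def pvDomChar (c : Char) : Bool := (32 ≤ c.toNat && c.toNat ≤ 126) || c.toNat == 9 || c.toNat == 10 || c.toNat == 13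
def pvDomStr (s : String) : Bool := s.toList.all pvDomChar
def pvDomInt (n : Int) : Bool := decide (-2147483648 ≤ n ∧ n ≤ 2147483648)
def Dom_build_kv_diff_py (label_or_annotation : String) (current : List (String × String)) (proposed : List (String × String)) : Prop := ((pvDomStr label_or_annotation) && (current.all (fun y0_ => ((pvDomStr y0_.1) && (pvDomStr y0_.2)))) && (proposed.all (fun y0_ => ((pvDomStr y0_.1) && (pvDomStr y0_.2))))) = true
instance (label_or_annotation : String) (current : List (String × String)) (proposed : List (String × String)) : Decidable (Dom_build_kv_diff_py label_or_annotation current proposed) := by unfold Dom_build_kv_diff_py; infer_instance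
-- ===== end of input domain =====

-- B replaces A's three dict comprehensions plus three independent sorts by ONE sorted pass over the
-- union of the key sets that classifies every key (objective: alternative decomposition, same cost).

-- Shared formatting helpers: the f-string/repr formatting both Pythons use verbatim.
-- Python's repr(s), exact on the domain's characters (printable ASCII, tab, newline, CR).
def pyReprChar (q : Char) (c : Char) : List Char :=
  if c = '\\' then ['\\', '\\']
  else if c = q then ['\\', q]
  else if c = Char.ofNat 9 then ['\\', 't']
  else if c = Char.ofNat 10 then ['\\', 'n']
  else if c = Char.ofNat 13 then ['\\', 'r']
  else [c]

def pyRepr (s : String) : String :=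
  let cs := s.toList
  let q : Char := if '\'' ∈ cs ∧ '"' ∉ cs then '"' else '\''
  String.ofList (q :: (cs.flatMap (pyReprChar q) ++ [q]))

def fmtAdded (k v : String) : String := "  + " ++ k ++ "=" ++ pyRepr v ++ "  ← ADDED"
def fmtChanged (k o n : String) : String := "  ~ " ++ k ++ ": " ++ pyRepr o ++ " → " ++ pyRepr n ++ "  ← CHANGED"
def fmtRemoved (k v : String) : String := "  - " ++ k ++ "=" ++ pyRepr v ++ "  ← REMOVED"
def fmtUnchanged (u : Int) : String := "  (unchanged: " ++ PySem.Int.toStr u ++ ")"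
def noChangesMsg (label_or_annotation : String) : String :=
  "No changes — proposed " ++ label_or_annotation ++ " are identical to current state."

-- ===== PORT A =====
def build_kv_diff_py (label_or_annotation : String) (current : List (String × String)) (proposed : List (String × String)) : String :=
  let added := proposed.filter (fun kv => decide (kv.1 ∉ current.map Prod.fst))
  let removed := current.filter (fun kv => decide (kv.1 ∉ proposed.map Prod.fst))
  let changed := proposed.filterMap (fun kv =>
    match List.lookup kv.1 current with
    | some o => if o ≠ kv.2 then some (kv.1, o, kv.2) else none
    | none => none)
  let unchanged_count : Int := (proposed.length : Int) - added.length - changed.length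
  if added = [] ∧ removed = [] ∧ changed = [] then noChangesMsg label_or_annotation
  else
    -- dict keys are unique, so Python's sort of the item tuples orders by the key alone (exact under Pre_)
    let lines :=
      (PySem.List.sorted added (fun p => p.1) false).map (fun p => fmtAdded p.1 p.2)
      ++ (PySem.List.sorted changed (fun p => p.1) false).map (fun p => fmtChanged p.1 p.2.1 p.2.2)
      ++ (PySem.List.sorted removed (fun p => p.1) false).map (fun p => fmtRemoved p.1 p.2)
      ++ [fmtUnchanged unchanged_count]
    PySem.Str.join "\n" lines

-- ===== PORT B =====
-- one classifying step of B's single pass ('k in current' / 'current[k]' ported via List.lookup)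
def bStep (current proposed : List (String × String))
    (acc : List String × List String × List String × Int) (k : String) :
    List String × List String × List String × Int :=
  match List.lookup k current, List.lookup k proposed with
  | some o, some n =>
      if o ≠ n then (acc.1, acc.2.1 ++ [fmtChanged k o n], acc.2.2.1, acc.2.2.2)
      else (acc.1, acc.2.1, acc.2.2.1, acc.2.2.2 + 1)
  | none, some n => (acc.1 ++ [fmtAdded k n], acc.2.1, acc.2.2.1, acc.2.2.2)
  | some o, none => (acc.1, acc.2.1, acc.2.2.1 ++ [fmtRemoved k o], acc.2.2.2)
  | none, none => acc  -- unreachable: k is drawn from the union of the key sets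

-- sorted(set(list(current) + list(proposed))): the sorted union of the key sets
def sortedKeyUnion (current proposed : List (String × String)) : List String :=
  PySem.List.sorted
    (PySem.Set.ofList (current.map Prod.fst ++ proposed.map Prod.fst)) (fun x => x) false

def build_kv_diff_py_alt (label_or_annotation : String) (current : List (String × String)) (proposed : List (String × String)) : String :=
  let keys := sortedKeyUnion current proposed
  let r := keys.foldl (bStep current proposed) ([], [], [], 0)
  if r.1 = [] ∧ r.2.1 = [] ∧ r.2.2.1 = [] then noChangesMsg label_or_annotation
  else PySem.Str.join "\n" (r.1 ++ r.2.1 ++ r.2.2.1 ++ [fmtUnchanged r.2.2.2])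

-- ===== PRECONDITION & SPEC =====
-- A Python dict never holds two entries with the same key, so the association lists standing for
-- 'current' and 'proposed' must have pairwise-distinct keys; no genuine dict input is excluded.
def Pre_build_kv_diff_py (label_or_annotation : String) (current : List (String × String)) (proposed : List (String × String)) : Prop :=
  (current.map Prod.fst).Nodup ∧ (proposed.map Prod.fst).Nodup
instance (label_or_annotation : String) (current : List (String × String)) (proposed : List (String × String)) : Decidable (Pre_build_kv_diff_py label_or_annotation current proposed) := by unfold Pre_build_kv_diff_py; infer_instance

def pvWitness_build_kv_diff_py : String × (List (String × String)) × (List (String × String)) :=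
  ("labels", [("app", "web"), ("tier", "old")], [("app", "web"), ("tier", "new"), ("env", "prod")])

def Spec_build_kv_diff_py (label_or_annotation : String) (current : List (String × String)) (proposed : List (String × String)) (out : String) : Prop := out = build_kv_diff_py_alt label_or_annotation current proposed
instance (label_or_annotation : String) (current : List (String × String)) (proposed : List (String × String)) (out : String) : Decidable (Spec_build_kv_diff_py label_or_annotation current proposed out) := by unfold Spec_build_kv_diff_py; infer_instance

-- ===== CLAIM (what is proved, stated in full; the proofs are below) =====
def Claim_equal_build_kv_diff_py : Prop := ∀ (label_or_annotation : String) (current : List (String × String)) (proposed : List (String × String)), Dom_build_kv_diff_py label_or_annotation current proposed → Pre_build_kv_diff_py label_or_annotation current proposed → Spec_build_kv_diff_py label_or_annotation current proposed (build_kv_diff_py label_or_annotation current proposed)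

-- ===== LEMMAS AND PROOFS =====

-- the pair (resp. triple) each union key contributes to B's added / changed / removed group
def gA (current proposed : List (String × String)) (k : String) : Option (String × String) :=
  match List.lookup k current, List.lookup k proposed with
  | none, some n => some (k, n)
  | _, _ => none

def gC (current proposed : List (String × String)) (k : String) : Option (String × String × String) :=
  match List.lookup k current, List.lookup k proposed with
  | some o, some n => if o ≠ n then some (k, o, n) else none
  | _, _ => none

def gR (current proposed : List (String × String)) (k : String) : Option (String × String) :=
  match List.lookup k current, List.lookup k proposed with
  | some o, none => some (k, o)
  | _, _ => none

def pU (current proposed : List (String × String)) (k : String) : Bool :=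
  match List.lookup k current, List.lookup k proposed with
  | some o, some n => o == n
  | _, _ => false

theorem lookup_none_iff (l : List (String × String)) (a : String) :
    List.lookup a l = none ↔ a ∉ l.map Prod.fst := by
  induction l with
  | nil => simp
  | cons hd t ih =>
    rcases hd with ⟨x, y⟩
    by_cases hx : a = x
    · subst hx; simp [List.lookup]
    · have hb : (a == x) = false := by simp [hx]
      simp [List.lookup, hb, ih, hx]

theorem lookup_some_iff (l : List (String × String)) (a b : String) (h : (l.map Prod.fst).Nodup) :
    List.lookup a l = some b ↔ (a, b) ∈ l := by
  induction l with
  | nil => simp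
  | cons hd t ih =>
    rcases hd with ⟨x, y⟩
    simp only [List.map_cons, List.nodup_cons] at h
    by_cases hx : a = x
    · subst hx
      simp only [List.lookup, BEq.rfl]
      constructor
      · rintro h'; simp at h'; subst h'; simp
      · intro hm
        rcases List.mem_cons.1 hm with heq | hmem
        · simp at heq; simp [heq]
        · exact absurd (List.mem_map.2 ⟨_, hmem, rfl⟩) h.1
    · have hb : (a == x) = false := by simp [hx]
      simp only [List.lookup, hb, List.mem_cons, ih h.2]
      constructor
      · exact Or.inr
      · rintro (heq | hmem)
        · exact absurd (congrArg Prod.fst heq) hx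
        · exact hmem

-- B's fold, computed: the three groups are filterMaps over the key list, the counter a countP
theorem foldB (current proposed : List (String × String)) (ks : List String)
    (a c r : List String) (u : Int) :
    ks.foldl (bStep current proposed) (a, c, r, u) =
      (a ++ (ks.filterMap (gA current proposed)).map (fun p => fmtAdded p.1 p.2),
       c ++ (ks.filterMap (gC current proposed)).map (fun p => fmtChanged p.1 p.2.1 p.2.2),
       r ++ (ks.filterMap (gR current proposed)).map (fun p => fmtRemoved p.1 p.2),
       u + ks.countP (pU current proposed)) := by
  induction ks generalizing a c r u with
  | nil => simp
  | cons k t ih =>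
    unfold gA gC gR pU at ih ⊢
    rcases hc : List.lookup k current with _ | o <;> rcases hp : List.lookup k proposed with _ | n <;>
      simp only [List.foldl_cons, bStep, List.filterMap_cons, List.countP_cons, hc, hp]
    · simpa using ih a c r u
    · simpa using (ih (a ++ [fmtAdded k n]) c r u)
    · simpa using (ih a c (r ++ [fmtRemoved k o]) u)
    · by_cases hne : o ≠ n
      · simpa [hne] using (ih a (c ++ [fmtChanged k o n]) r u)
      · simp only [ne_eq, not_not] at hne
        subst hne
        have hif : (if o ≠ o then (a, c ++ [fmtChanged k o o], r, u) else (a, c, r, u + 1))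
            = (a, c, r, u + 1) := by simp
        rw [hif, ih a c r (u + 1)]
        simp [Prod.ext_iff]
        omega

-- a key-preserving filterMap of a strictly increasing key list is strictly increasing in the key
theorem pairwise_filterMap_key {β : Type} (f : String → Option β) (key : β → String)
    (hf : ∀ k p, f k = some p → key p = k) (ks : List String) (h : ks.Pairwise (· < ·)) :
    (ks.filterMap f).Pairwise (fun a b => key a < key b) := by
  induction ks with
  | nil => simp
  | cons k t ih =>
    rcases List.pairwise_cons.1 h with ⟨hk, ht⟩
    rcases hp : f k with _ | p
    · simpa [List.filterMap_cons, hp] using ih ht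
    · simp only [List.filterMap_cons, hp, List.pairwise_cons]
      refine ⟨?_, ih ht⟩
      intro b hb
      rcases List.mem_filterMap.1 hb with ⟨x, hx, hfx⟩
      rw [hf k p hp, hf x b hfx]
      exact hk x hx

theorem gA_eq_some (current proposed : List (String × String)) (x : String) (p : String × String) :
    gA current proposed x = some p ↔
      p.1 = x ∧ List.lookup x current = none ∧ List.lookup x proposed = some p.2 := by
  unfold gA
  rcases hc : List.lookup x current with _ | o <;> rcases hq : List.lookup x proposed with _ | n <;>
    simp [Prod.ext_iff, eq_comm, and_comm]

theorem gC_eq_some (current proposed : List (String × String)) (x : String)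
    (p : String × String × String) :
    gC current proposed x = some p ↔
      p.1 = x ∧ List.lookup x current = some p.2.1 ∧ List.lookup x proposed = some p.2.2
        ∧ p.2.1 ≠ p.2.2 := by
  unfold gC
  rcases hc : List.lookup x current with _ | o <;> rcases hq : List.lookup x proposed with _ | n <;>
    simp [Prod.ext_iff]
  by_cases hne : o = n
  · simp [hne]
    intro _ h1 h2
    rw [← h1, ← h2]
  · simp [hne]
    constructor
    · rintro ⟨rfl, rfl, rfl⟩; tauto
    · rintro ⟨rfl, rfl, rfl, _⟩; tauto

theorem gR_eq_some (current proposed : List (String × String)) (x : String) (p : String × String) :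
    gR current proposed x = some p ↔
      p.1 = x ∧ List.lookup x current = some p.2 ∧ List.lookup x proposed = none := by
  unfold gR
  rcases p with ⟨pk, pv⟩
  rcases hc : List.lookup x current with _ | o <;> rcases hq : List.lookup x proposed with _ | n <;>
    simp [Prod.ext_iff] <;> aesop

theorem pU_true (current proposed : List (String × String)) (x : String) :
    pU current proposed x = true ↔
      ∃ v, List.lookup x current = some v ∧ List.lookup x proposed = some v := by
  unfold pU
  rcases hc : List.lookup x current with _ | o <;> rcases hq : List.lookup x proposed with _ | n <;>
    simp <;> aesop

theorem mem_UK (current proposed : List (String × String)) (k : String) :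
    k ∈ sortedKeyUnion current proposed ↔
      k ∈ current.map Prod.fst ∨ k ∈ proposed.map Prod.fst := by
  unfold sortedKeyUnion
  rw [PySem.List.mem_sorted, PySem.Set.mem_ofList, List.mem_append]

theorem UK_lt (current proposed : List (String × String)) :
    (sortedKeyUnion current proposed).Pairwise (· < ·) :=
  PySem.List.sorted_ofList_pairwise_lt _

theorem UK_nodup (current proposed : List (String × String)) :
    (sortedKeyUnion current proposed).Nodup :=
  (UK_lt current proposed).imp (fun h => ne_of_lt h)

theorem nodup_of_key_lt {β : Type} (key : β → String) (l : List β)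
    (h : l.Pairwise (fun a b => key a < key b)) : l.Nodup :=
  h.imp (fun {a b} hlt => fun e => absurd (e ▸ hlt) (lt_irrefl _))

theorem added_eq (current proposed : List (String × String))
    (hp : (proposed.map Prod.fst).Nodup) :
    PySem.List.sorted (proposed.filter (fun kv => decide (kv.1 ∉ current.map Prod.fst)))
        (fun p => p.1) false
      = (sortedKeyUnion current proposed).filterMap (gA current proposed) := by
  apply PySem.List.sorted_eq_of_perm_of_pairwise_lt
  · rw [List.perm_ext_iff_of_nodup]
    · rintro ⟨k, v⟩
      rw [List.mem_filterMap, List.mem_filter]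
      constructor
      · rintro ⟨x, hx, hg⟩
        obtain ⟨rfl, hno, hsome⟩ := (gA_eq_some _ _ _ _).1 hg
        exact ⟨(lookup_some_iff _ _ _ hp).1 hsome, by simpa using (lookup_none_iff _ _).1 hno⟩
      · rintro ⟨hmem, hnot⟩
        simp only [decide_eq_true_eq] at hnot
        refine ⟨k, (mem_UK _ _ _).2 (Or.inr (List.mem_map.2 ⟨_, hmem, rfl⟩)), ?_⟩
        exact (gA_eq_some _ _ _ _).2
          ⟨rfl, (lookup_none_iff _ _).2 hnot, (lookup_some_iff _ _ _ hp).2 hmem⟩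
    · exact nodup_of_key_lt (fun p => p.1) _ (pairwise_filterMap_key _ (fun p => p.1)
        (fun k p h => ((gA_eq_some _ _ _ _).1 h).1) _ (UK_lt _ _))
    · exact (List.Nodup.of_map _ hp).filter _
  · exact pairwise_filterMap_key _ (fun p => p.1)
      (fun k p h => ((gA_eq_some _ _ _ _).1 h).1) _ (UK_lt _ _)

theorem removed_eq (current proposed : List (String × String))
    (hc : (current.map Prod.fst).Nodup) :
    PySem.List.sorted (current.filter (fun kv => decide (kv.1 ∉ proposed.map Prod.fst)))
        (fun p => p.1) false
      = (sortedKeyUnion current proposed).filterMap (gR current proposed) := by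
  apply PySem.List.sorted_eq_of_perm_of_pairwise_lt
  · rw [List.perm_ext_iff_of_nodup]
    · rintro ⟨k, v⟩
      rw [List.mem_filterMap, List.mem_filter]
      constructor
      · rintro ⟨x, hx, hg⟩
        obtain ⟨rfl, hsome, hno⟩ := (gR_eq_some _ _ _ _).1 hg
        exact ⟨(lookup_some_iff _ _ _ hc).1 hsome, by simpa using (lookup_none_iff _ _).1 hno⟩
      · rintro ⟨hmem, hnot⟩
        simp only [decide_eq_true_eq] at hnot
        refine ⟨k, (mem_UK _ _ _).2 (Or.inl (List.mem_map.2 ⟨_, hmem, rfl⟩)), ?_⟩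
        exact (gR_eq_some _ _ _ _).2
          ⟨rfl, (lookup_some_iff _ _ _ hc).2 hmem, (lookup_none_iff _ _).2 hnot⟩
    · exact nodup_of_key_lt (fun p => p.1) _ (pairwise_filterMap_key _ (fun p => p.1)
        (fun k p h => ((gR_eq_some _ _ _ _).1 h).1) _ (UK_lt _ _))
    · exact (List.Nodup.of_map _ hc).filter _
  · exact pairwise_filterMap_key _ (fun p => p.1)
      (fun k p h => ((gR_eq_some _ _ _ _).1 h).1) _ (UK_lt _ _)

theorem chA_eq_some (current : List (String × String)) (kv : String × String)
    (p : String × String × String) :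
    (match List.lookup kv.1 current with
      | some o => if o ≠ kv.2 then some (kv.1, o, kv.2) else none
      | none => none) = some p ↔
      p.1 = kv.1 ∧ List.lookup kv.1 current = some p.2.1 ∧ p.2.2 = kv.2 ∧ p.2.1 ≠ p.2.2 := by
  rcases kv with ⟨k0, v0⟩
  rcases p with ⟨pk, po, pn⟩
  rcases hc : List.lookup (k0, v0).1 current with _ | o
  · simp
  · by_cases hne : o = (k0, v0).2
    · simp [hne, Prod.ext_iff]
      intro _ h1 h2
      rw [← h1, ← h2]
    · simp only [hc]
      simp [hne, Prod.ext_iff] <;> aesop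

theorem changed_eq (current proposed : List (String × String))
    (hp : (proposed.map Prod.fst).Nodup) :
    PySem.List.sorted (proposed.filterMap (fun kv =>
        match List.lookup kv.1 current with
        | some o => if o ≠ kv.2 then some (kv.1, o, kv.2) else none
        | none => none)) (fun p => p.1) false
      = (sortedKeyUnion current proposed).filterMap (gC current proposed) := by
  apply PySem.List.sorted_eq_of_perm_of_pairwise_lt
  · rw [List.perm_ext_iff_of_nodup]
    · rintro ⟨k, o, n⟩
      rw [List.mem_filterMap, List.mem_filterMap]
      constructor
      · rintro ⟨x, hx, hg⟩
        obtain ⟨rfl, hco, hpn, hne⟩ := (gC_eq_some _ _ _ _).1 hg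
        refine ⟨(k, n), (lookup_some_iff _ _ _ hp).1 hpn, ?_⟩
        exact (chA_eq_some _ _ _).2 ⟨rfl, hco, rfl, hne⟩
      · rintro ⟨kv, hmem, hg⟩
        obtain ⟨hk, hco, hn, hne⟩ := (chA_eq_some _ _ _).1 hg
        simp only at hk hco hn
        have hkv : kv = (k, n) := by
          rcases kv with ⟨a, b⟩; simp only at hk hn; simp [← hk, ← hn]
        subst hkv
        simp only at hco hne ⊢
        refine ⟨k, (mem_UK _ _ _).2 (Or.inr (List.mem_map.2 ⟨_, hmem, rfl⟩)), ?_⟩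
        exact (gC_eq_some _ _ _ _).2 ⟨rfl, hco, (lookup_some_iff _ _ _ hp).2 hmem, hne⟩
    · exact nodup_of_key_lt (fun p => p.1) _ (pairwise_filterMap_key _ (fun p => p.1)
        (fun k p h => ((gC_eq_some _ _ _ _).1 h).1) _ (UK_lt _ _))
    · refine List.Nodup.filterMap ?_ (List.Nodup.of_map _ hp)
      intro a a' b hb hb'
      obtain ⟨h1, _, h3, _⟩ := (chA_eq_some _ _ _).1 hb
      obtain ⟨h1', _, h3', _⟩ := (chA_eq_some _ _ _).1 hb'
      rcases a with ⟨a1, a2⟩; rcases a' with ⟨a1', a2'⟩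
      simp only at h1 h3 h1' h3'
      simp [← h1, ← h3, ← h1', ← h3']
  · exact pairwise_filterMap_key _ (fun p => p.1)
      (fun k p h => ((gC_eq_some _ _ _ _).1 h).1) _ (UK_lt _ _)

-- the three lookup-branches of a proposed entry are mutually exclusive and exhaustive
theorem sum3 (current proposed : List (String × String)) :
    (proposed.filter (fun kv => decide (kv.1 ∉ current.map Prod.fst))).length
      + (proposed.filterMap (fun kv =>
          match List.lookup kv.1 current with
          | some o => if o ≠ kv.2 then some (kv.1, o, kv.2) else none
          | none => none)).length
      + proposed.countP (fun kv =>
          match List.lookup kv.1 current with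
          | some o => o == kv.2
          | none => false)
      = proposed.length := by
  rw [List.length_filterMap_eq_countP, ← List.countP_eq_length_filter]
  induction proposed with
  | nil => simp
  | cons kv t ih =>
    rw [List.countP_cons, List.countP_cons, List.countP_cons, List.length_cons]
    rcases hc : List.lookup kv.1 current with _ | o
    · have b1 : decide (kv.1 ∉ current.map Prod.fst) = true := by
        simp [(lookup_none_iff _ _).1 hc]
      dsimp only
      simp only [b1, eq_self_iff_true, Bool.false_eq_true, if_true, if_false,
        Option.isSome_none]
      omega
    · have b1 : decide (kv.1 ∉ current.map Prod.fst) = false := by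
        have hm : kv.1 ∈ current.map Prod.fst := by
          by_contra hn
          rw [(lookup_none_iff _ _).2 hn] at hc; cases hc
        simp [hm]
      by_cases hne : o = kv.2
      · have b2 : (if o ≠ kv.2 then some (kv.1, o, kv.2) else none).isSome = false := by
          simp [hne]
        have b3 : (o == kv.2) = true := by simp [hne]
        dsimp only
        simp only [b1, b2, b3, eq_self_iff_true, Bool.false_eq_true, if_true, if_false]
        omega
      · have b2 : (if o ≠ kv.2 then some (kv.1, o, kv.2) else none).isSome = true := by
          simp [hne]
        have b3 : (o == kv.2) = false := by simp [hne]
        dsimp only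
        simp only [b1, b2, b3, eq_self_iff_true, Bool.false_eq_true, if_true, if_false]
        omega

theorem count_eq (current proposed : List (String × String))
    (hc : (current.map Prod.fst).Nodup) (hp : (proposed.map Prod.fst).Nodup) :
    (sortedKeyUnion current proposed).countP (pU current proposed)
      = proposed.countP (fun kv =>
          match List.lookup kv.1 current with
          | some o => o == kv.2
          | none => false) := by
  have hperm : ((sortedKeyUnion current proposed).filter (pU current proposed)).Perm
      ((proposed.map Prod.fst).filter (pU current proposed)) := by
    rw [List.perm_ext_iff_of_nodup ((UK_nodup _ _).filter _) (hp.filter _)]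
    intro k
    rw [List.mem_filter, List.mem_filter]
    constructor
    · rintro ⟨_, hpu⟩
      obtain ⟨v, _, hps⟩ := (pU_true _ _ _).1 hpu
      have : k ∈ proposed.map Prod.fst := by
        by_contra hn
        rw [(lookup_none_iff _ _).2 hn] at hps; cases hps
      exact ⟨this, hpu⟩
    · rintro ⟨hmem, hpu⟩
      exact ⟨(mem_UK _ _ _).2 (Or.inr hmem), hpu⟩
  calc (sortedKeyUnion current proposed).countP (pU current proposed)
      = ((sortedKeyUnion current proposed).filter (pU current proposed)).length :=
        List.countP_eq_length_filter
    _ = ((proposed.map Prod.fst).filter (pU current proposed)).length := hperm.length_eq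
    _ = (proposed.map Prod.fst).countP (pU current proposed) :=
        List.countP_eq_length_filter.symm
    _ = proposed.countP ((pU current proposed) ∘ Prod.fst) := List.countP_map
    _ = _ := by
        apply List.countP_congr
        intro kv hmem
        have hps : List.lookup kv.1 proposed = some kv.2 :=
          (lookup_some_iff _ _ _ hp).2 (by rcases kv with ⟨a, b⟩; exact hmem)
        simp only [Function.comp_apply]
        unfold pU
        rw [hps]
        rcases List.lookup kv.1 current with _ | o <;> simp

theorem main_eq (label_or_annotation : String) (current proposed : List (String × String))
    (hc : (current.map Prod.fst).Nodup) (hp : (proposed.map Prod.fst).Nodup) :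
    build_kv_diff_py label_or_annotation current proposed
      = build_kv_diff_py_alt label_or_annotation current proposed := by
  simp only [build_kv_diff_py, build_kv_diff_py_alt]
  rw [foldB]
  simp only [List.nil_append, zero_add]
  rw [← added_eq current proposed hp, ← changed_eq current proposed hp,
    ← removed_eq current proposed hc, count_eq current proposed hc hp]
  have hcnt : (proposed.length : Int)
      - (proposed.filter (fun kv => decide (kv.1 ∉ current.map Prod.fst))).length
      - (proposed.filterMap (fun kv =>
          match List.lookup kv.1 current with
          | some o => if o ≠ kv.2 then some (kv.1, o, kv.2) else none
          | none => none)).length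
      = (proposed.countP (fun kv =>
          match List.lookup kv.1 current with
          | some o => o == kv.2
          | none => false) : Int) := by
    have h3 := sum3 current proposed
    omega
  rw [← hcnt]
  apply if_congr
  · rw [List.map_eq_nil_iff, List.map_eq_nil_iff, List.map_eq_nil_iff,
      PySem.List.sorted_eq_nil_iff, PySem.List.sorted_eq_nil_iff, PySem.List.sorted_eq_nil_iff]
    tauto
  · rfl
  · rfl

-- ===== VERDICT (by name: the statement is the Claim_ definition above) =====
theorem build_kv_diff_py_spec : Claim_equal_build_kv_diff_py := by
  intro label current proposed _ hpre
  exact main_eq label current proposed hpre.1 hpre.2
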